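-- pv_equiv track=rewrite | github.com/beibo/python2 | assignments/lab5.py | dictionary
-- ===== SOURCE A (Python) =====
-- def dictionary(l):
--
--     l.sort();
--     dd={};
--     for i in l:
--
--         if i[0] in dd:
--             dd[i[0]].append(i);
--         else:
--             dd[i[0]]=[i];
--     return dd;
-- ===== SOURCE B (Python) =====
-- def dictionary(l):
--     l.sort()
--     keys = sorted({x[0] for x in l})
--     return {k: [x for x in l if x[0] == k] for k in keys}
-- ===== Notes on version B (the rewrite author's own statement) =====
-- stated objective: alternative
-- what changed: B replaces A's single dict-building pass (per-element membership test and append) by two staged passes: it first collects the set of distinct first characters and sorts it, then builds each bucket with an independent filtering comprehension over the sorted list; no dict is maintained during traversal. Both sort l in place (same mutation).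
-- outside the precondition, e.g. on dictionary(['', 'a']): A raises IndexError, B raises IndexError
import Mathlib
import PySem

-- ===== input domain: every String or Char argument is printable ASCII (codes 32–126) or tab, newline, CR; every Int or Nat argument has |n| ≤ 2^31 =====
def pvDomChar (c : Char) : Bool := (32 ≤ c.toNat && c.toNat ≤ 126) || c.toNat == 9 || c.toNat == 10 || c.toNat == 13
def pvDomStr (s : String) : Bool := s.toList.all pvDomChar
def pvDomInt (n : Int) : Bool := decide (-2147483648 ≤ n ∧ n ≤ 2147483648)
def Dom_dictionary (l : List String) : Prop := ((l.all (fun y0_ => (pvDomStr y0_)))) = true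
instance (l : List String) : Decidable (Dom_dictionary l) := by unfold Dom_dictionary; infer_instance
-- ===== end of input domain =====

-- B builds the result in staged passes — the sorted set of distinct first characters, then one
-- filtering pass per key — instead of A's dict with a per-element membership test; equivalence is
-- about the return value (both A and B sort the argument l in place, the same mutation).

-- shared key helper: i[0] as a one-character string; exact for nonempty i (Pre_ excludes "")
def pvFirst (s : String) : String := String.ofList (s.toList.take 1)

-- ===== PORT A =====
def pvStepA (dd : PySem.Dict String (List String)) (i : String) : PySem.Dict String (List String) :=
  if dd.contains (pvFirst i) then
    -- dd[i[0]].append(i) : rebind the bucket with i appended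
    dd.insert (pvFirst i) (dd.getD (pvFirst i) [] ++ [i])
  else
    dd.insert (pvFirst i) [i]

def dictionary (l : List String) : List (String × List String) :=
  ((PySem.List.sorted l (fun x => x) false).foldl pvStepA PySem.Dict.empty).items

-- ===== PORT B =====
-- keys = sorted({x[0] for x in l}); then {k: [x for x in l if x[0] == k] for k in keys}
def dictionary_alt (l : List String) : List (String × List String) :=
  let ls := PySem.List.sorted l (fun x => x) false
  let keys := PySem.List.sorted (PySem.Set.ofList (ls.map pvFirst)) (fun x => x) false
  keys.map (fun k => (k, ls.filter (fun x => pvFirst x == k)))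

-- ===== PRECONDITION & SPEC =====
-- Pre_ excludes lists containing the empty string: there i[0] (A) and x[0] (B) raise IndexError.
def Pre_dictionary (l : List String) : Prop := "" ∉ l
instance (l : List String) : Decidable (Pre_dictionary l) := by unfold Pre_dictionary; infer_instance

def pvWitness_dictionary : List String := ["ba", "ab", "ax", "ba", "c"]

def Spec_dictionary (l : List String) (out : List (String × List String)) : Prop := out = dictionary_alt l
instance (l : List String) (out : List (String × List String)) : Decidable (Spec_dictionary l out) := by unfold Spec_dictionary; infer_instance

-- ===== CLAIM (what is proved, stated in full; the proofs are below) =====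
def Claim_equal_dictionary : Prop := ∀ (l : List String), Dom_dictionary l → Pre_dictionary l → Spec_dictionary l (dictionary l)

-- ===== LEMMAS AND PROOFS =====

-- proof-side intermediate form: contiguous grouping of the sorted list
def pvGroupby (xs : List String) : List (String × List String) :=
  match xs with
  | [] => []
  | x :: rest =>
    (pvFirst x, x :: rest.takeWhile (fun y => pvFirst y == pvFirst x)) ::
      pvGroupby (rest.dropWhile (fun y => pvFirst y == pvFirst x))
termination_by xs.length
decreasing_by
  simp only [List.length_cons]
  exact Nat.lt_succ_of_le (List.length_dropWhile_le _ _)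

-- first characters are monotone along string ≤ (nonempty strings)
lemma pvToList_ne_nil {s : String} (hs : s ≠ "") : s.toList ≠ [] := by
  intro hnil
  exact hs (by rw [← String.ofList_toList (s := s), hnil])

lemma pvFirst_mono {s t : String} (hs : s ≠ "") (ht : t ≠ "") (h : s ≤ t) :
    s.toList.headD default ≤ t.toList.headD default := by
  have h' : s.toList ≤ t.toList := String.le_iff_toList_le.mp h
  have hs' := pvToList_ne_nil hs
  have ht' := pvToList_ne_nil ht
  match hls : s.toList, hlt : t.toList with
  | [], _ => exact absurd hls hs'
  | _ :: _, [] => exact absurd hlt ht'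
  | a :: as, b :: bs =>
    rw [hls, hlt] at h'
    simp only [List.headD_cons]
    by_contra hab
    have hba : b < a := lt_of_not_ge hab
    exact absurd (lt_of_lt_of_le (show (b::bs) < (a::as) from List.Lex.rel hba) h')
      (lt_irrefl _)

lemma pvFirst_eq_iff {s t : String} (hs : s ≠ "") (ht : t ≠ "") :
    (pvFirst s = pvFirst t) ↔ s.toList.headD default = t.toList.headD default := by
  have hs' := pvToList_ne_nil hs
  have ht' := pvToList_ne_nil ht
  match hls : s.toList, hlt : t.toList with
  | [], _ => exact absurd hls hs'
  | _ :: _, [] => exact absurd hlt ht'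
  | a :: as, b :: bs =>
    simp [pvFirst, hls, hlt, String.ofList_inj]

lemma pvFirst_lt {s t : String} (hs : s ≠ "") (ht : t ≠ "") (hle : s ≤ t)
    (hne : pvFirst s ≠ pvFirst t) : pvFirst s < pvFirst t := by
  have hc : s.toList.headD default ≤ t.toList.headD default := pvFirst_mono hs ht hle
  have hcne : s.toList.headD default ≠ t.toList.headD default :=
    fun h => hne ((pvFirst_eq_iff hs ht).mpr h)
  have hclt : s.toList.headD default < t.toList.headD default := lt_of_le_of_ne hc hcne
  have hs' := pvToList_ne_nil hs
  have ht' := pvToList_ne_nil ht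
  match hls : s.toList, hlt : t.toList with
  | [], _ => exact absurd hls hs'
  | _ :: _, [] => exact absurd hlt ht'
  | a :: as, b :: bs =>
    rw [hls, hlt] at hclt
    simp only [List.headD_cons] at hclt
    have h1 : pvFirst s = String.ofList [a] := by simp [pvFirst, hls]
    have h2 : pvFirst t = String.ofList [b] := by simp [pvFirst, hlt]
    rw [h1, h2, String.lt_iff_toList_lt]
    simpa using List.Lex.rel hclt

-- the first element surviving dropWhile fails the predicate
lemma pvDropWhileHead {a : Type} (p : a -> Bool) : forall (l : List a) (h : a) (t : List a),
    l.dropWhile p = h :: t -> p h = false := by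
  intro l
  induction l with
  | nil => intro h t hd; simp at hd
  | cons b l ih =>
    intro h t hd
    by_cases hp : p b
    . rw [List.dropWhile_cons_of_pos hp] at hd; exact ih _ _ hd
    . rw [List.dropWhile_cons_of_neg hp] at hd
      cases hd; simpa using hp

-- after the run of key pvFirst x, every key differs from pvFirst x
lemma pvKeyNe (x : String) (rest : List String)
    (hpair : (x :: rest).Pairwise (· ≤ ·)) (hne : ∀ y ∈ x :: rest, y ≠ "") :
    ∀ y ∈ rest.dropWhile (fun y => pvFirst y == pvFirst x), pvFirst y ≠ pvFirst x := by
  have hxne : x ≠ "" := hne x List.mem_cons_self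
  have hpairrest : rest.Pairwise (· ≤ ·) := (List.pairwise_cons.mp hpair).2
  have hxle : ∀ y ∈ rest, x ≤ y := (List.pairwise_cons.mp hpair).1
  intro y hy heq
  match hd : rest.dropWhile (fun y => pvFirst y == pvFirst x) with
  | [] => rw [hd] at hy; exact absurd hy (List.not_mem_nil)
  | h :: t =>
    have hhk : ¬ (pvFirst h = pvFirst x) := by
      have := pvDropWhileHead (fun y => pvFirst y == pvFirst x) rest h t hd
      simpa using this
    have hmemrest : ∀ z ∈ rest.dropWhile (fun y => pvFirst y == pvFirst x), z ∈ rest :=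
      fun z hz => List.dropWhile_sublist _ |>.mem hz
    have hhrest : h ∈ rest := hmemrest h (by rw [hd]; exact List.mem_cons_self)
    have hyrest : y ∈ rest := hmemrest y hy
    have hhne : h ≠ "" := hne h (List.mem_cons_of_mem _ hhrest)
    have hyne : y ≠ "" := hne y (List.mem_cons_of_mem _ hyrest)
    have hpair' : (rest.dropWhile (fun y => pvFirst y == pvFirst x)).Pairwise (· ≤ ·) :=
      hpairrest.sublist (List.dropWhile_sublist _)
    have hhy : h ≤ y := by
      rw [hd] at hy hpair'
      rcases List.mem_cons.mp hy with rfl | hyt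
      · exact le_refl _
      · exact (List.pairwise_cons.mp hpair').1 y hyt
    have hc1 := pvFirst_mono hxne hhne (hxle h hhrest)
    have hc2 := pvFirst_mono hhne hyne hhy
    have hcyx : y.toList.headD default = x.toList.headD default :=
      (pvFirst_eq_iff hyne hxne).mp heq
    have : h.toList.headD default = x.toList.headD default := by
      rw [hcyx] at hc2; exact le_antisymm hc2 hc1
    exact hhk ((pvFirst_eq_iff hhne hxne).mpr this)

-- folding A's step over a run whose elements all have key k, starting from a dict whose
-- items are pre ++ [(k, acc)] with k not a key of pre, appends the run to that bucket
lemma pvFoldRun (run : List String) : ∀ (pre : List (String × List String)) (k : String) (acc : List String),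
    (∀ y ∈ run, pvFirst y = k) → (∀ p ∈ pre, p.1 ≠ k) →
    (run.foldl pvStepA ⟨pre ++ [(k, acc)]⟩).items = pre ++ [(k, acc ++ run)] := by
  induction run with
  | nil => intro pre k acc _ _; simp
  | cons y run' ih =>
    intro pre k acc hall hpre
    have hky : pvFirst y = k := hall y (List.mem_cons_self)
    have hfind : (pre ++ [(k, acc)]).find? (fun p => p.1 == k) = some (k, acc) := by
      rw [List.find?_append, List.find?_eq_none.mpr (by
        intro p hp; simpa using hpre p hp)]
      simp
    have hstep : pvStepA ⟨pre ++ [(k, acc)]⟩ y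
        = ⟨pre ++ [(k, acc ++ [y])]⟩ := by
      simp only [pvStepA, hky, PySem.Dict.contains, PySem.Dict.insert, PySem.Dict.getD,
        PySem.Dict.get?, hfind, Option.map_some, Option.getD_some]
      have : ((pre ++ [(k, acc)]).any fun p => p.1 == k) = true := by
        simp
      simp only [this, if_true]
      congr 1
      rw [List.map_append]
      congr 1
      · have hid : ∀ p ∈ pre, (fun p : String × List String =>
            if p.1 == k then (k, acc ++ [y]) else p) p = id p := by
          intro p hp; simp [hpre p hp]
        rw [List.map_congr_left hid, List.map_id]
      · simp
    rw [List.foldl_cons, hstep,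
      ih pre k (acc ++ [y]) (fun z hz => hall z (List.mem_cons_of_mem _ hz)) hpre]
    simp

-- A's fold, on a sorted empty-string-free list with all keys fresh for d, extends d.items by pvGroupby
lemma pvMain : ∀ (n : Nat) (xs : List String), xs.length ≤ n →
    xs.Pairwise (· ≤ ·) → (∀ y ∈ xs, y ≠ "") →
    ∀ (d : PySem.Dict String (List String)), (∀ y ∈ xs, d.contains (pvFirst y) = false) →
    (xs.foldl pvStepA d).items = d.items ++ pvGroupby xs := by
  intro n
  induction n with
  | zero =>
    intro xs hlen _ _ d _
    have : xs = [] := List.length_eq_zero_iff.mp (Nat.le_zero.mp hlen)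
    subst this; simp [pvGroupby]
  | succ n ih =>
    intro xs hlen hpair hne d hfresh
    match xs with
    | [] => simp [pvGroupby]
    | x :: rest =>
      have hxne : x ≠ "" := hne x List.mem_cons_self
      have hpairrest : rest.Pairwise (· ≤ ·) := (List.pairwise_cons.mp hpair).2
      have hnokey : ∀ p ∈ d.items, p.1 ≠ pvFirst x := by
        intro p hp heq
        have := hfresh x List.mem_cons_self
        simp only [PySem.Dict.contains, List.any_eq_false] at this
        exact absurd heq (by simpa using this p hp)
      have hstep1 : pvStepA d x = ⟨d.items ++ [(pvFirst x, [x])]⟩ := by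
        simp [pvStepA, PySem.Dict.insert, hfresh x List.mem_cons_self]
      have hsplit : rest = rest.takeWhile (fun y => pvFirst y == pvFirst x)
          ++ rest.dropWhile (fun y => pvFirst y == pvFirst x) :=
        (List.takeWhile_append_dropWhile).symm
      have hrunk : ∀ y ∈ rest.takeWhile (fun y => pvFirst y == pvFirst x), pvFirst y = pvFirst x := by
        intro y hy
        have := List.mem_takeWhile_imp hy
        simpa using this
      have hstep2 : ((rest.takeWhile (fun y => pvFirst y == pvFirst x)).foldl pvStepA
            ⟨d.items ++ [(pvFirst x, [x])]⟩)
          = ⟨d.items ++ [(pvFirst x, x :: rest.takeWhile (fun y => pvFirst y == pvFirst x))]⟩ := by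
        have heta : ((rest.takeWhile (fun y => pvFirst y == pvFirst x)).foldl pvStepA
            ⟨d.items ++ [(pvFirst x, [x])]⟩)
            = ⟨((rest.takeWhile (fun y => pvFirst y == pvFirst x)).foldl pvStepA
              ⟨d.items ++ [(pvFirst x, [x])]⟩).items⟩ := rfl
        rw [heta, pvFoldRun _ d.items (pvFirst x) [x] hrunk hnokey]
        rfl
      have hkeyne := pvKeyNe x rest hpair hne
      have hstep3 := ih (rest.dropWhile (fun y => pvFirst y == pvFirst x))
        (by
          have h1 : (rest.dropWhile (fun y => pvFirst y == pvFirst x)).length ≤ rest.length :=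
            List.length_dropWhile_le _ _
          have h2 : rest.length ≤ n := by simpa using Nat.le_of_succ_le_succ hlen
          exact le_trans h1 h2)
        (hpairrest.sublist (List.dropWhile_sublist _))
        (fun y hy => hne y (List.mem_cons_of_mem _ ((List.dropWhile_sublist _).mem hy)))
        ⟨d.items ++ [(pvFirst x, x :: rest.takeWhile (fun y => pvFirst y == pvFirst x))]⟩
        (by
          intro y hy
          have hyrest : y ∈ rest := (List.dropWhile_sublist _).mem hy
          have hf := hfresh y (List.mem_cons_of_mem _ hyrest)
          simp only [PySem.Dict.contains, List.any_eq_false] at hf ⊢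
          intro p hp
          rcases List.mem_append.mp hp with hpd | hpk
          · exact hf p hpd
          · simp only [List.mem_singleton] at hpk
            subst hpk
            simpa using (hkeyne y hy).symm)
      rw [List.foldl_cons, hstep1]
      conv_lhs => rw [hsplit]
      rw [List.foldl_append, hstep2, hstep3]
      have hgb : pvGroupby (x :: rest)
          = (pvFirst x, x :: rest.takeWhile (fun y => pvFirst y == pvFirst x))
            :: pvGroupby (rest.dropWhile (fun y => pvFirst y == pvFirst x)) := by
        rw [pvGroupby]
      rw [hgb]
      simp

-- Set.add/foldl helpers for decomposing Set.ofList of the key list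
lemma pvFoldAddMem (ks : List String) : ∀ (s : List String), (∀ a ∈ ks, a ∈ s) →
    ks.foldl PySem.Set.add s = s := by
  induction ks with
  | nil => intro s _; rfl
  | cons k ks ih =>
    intro s hall
    have hk : k ∈ s := hall k List.mem_cons_self
    have : PySem.Set.add s k = s := by
      simp [PySem.Set.add, PySem.Set.contains, hk]
    rw [List.foldl_cons, this]
    exact ih s (fun a ha => hall a (List.mem_cons_of_mem _ ha))

lemma pvFoldAddCons (bs : List String) : ∀ (s : List String) (a : String), a ∉ bs →
    bs.foldl PySem.Set.add (a :: s) = a :: bs.foldl PySem.Set.add s := by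
  induction bs with
  | nil => intro s a _; rfl
  | cons b bs ih =>
    intro s a hnot
    have hba : b ≠ a := fun h => hnot (by simp [h])
    have : PySem.Set.add (a :: s) b = a :: PySem.Set.add s b := by
      simp only [PySem.Set.add, PySem.Set.contains, List.contains_cons]
      have hf : (b == a) = false := by simpa using hba
      rw [hf]
      simp only [Bool.false_or]
      split_ifs <;> rfl
    rw [List.foldl_cons, this, List.foldl_cons,
      ih _ a (fun h => hnot (List.mem_cons_of_mem _ h))]

-- the combined B-side invariant: the deduped key list is strictly increasing and pvGroupby
-- equals the per-key filtering form
lemma pvMainB : ∀ (n : Nat) (xs : List String), xs.length ≤ n →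
    xs.Pairwise (· ≤ ·) → (∀ y ∈ xs, y ≠ "") →
    (PySem.Set.ofList (xs.map pvFirst)).Pairwise (· < ·) ∧
    pvGroupby xs = (PySem.Set.ofList (xs.map pvFirst)).map
      (fun k => (k, xs.filter (fun y => pvFirst y == k))) := by
  intro n
  induction n with
  | zero =>
    intro xs hlen _ _
    have : xs = [] := List.length_eq_zero_iff.mp (Nat.le_zero.mp hlen)
    subst this
    exact ⟨by simp [PySem.Set.ofList], by simp [pvGroupby, PySem.Set.ofList]⟩
  | succ n ih =>
    intro xs hlen hpair hne
    match xs with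
    | [] => exact ⟨by simp [PySem.Set.ofList], by simp [pvGroupby, PySem.Set.ofList]⟩
    | x :: rest =>
      have hxne : x ≠ "" := hne x List.mem_cons_self
      have hxle : ∀ y ∈ rest, x ≤ y := (List.pairwise_cons.mp hpair).1
      have hkeyne := pvKeyNe x rest hpair hne
      set run := rest.takeWhile (fun y => pvFirst y == pvFirst x) with hrun
      set rem := rest.dropWhile (fun y => pvFirst y == pvFirst x) with hrem
      have hsplit : rest = run ++ rem := (List.takeWhile_append_dropWhile).symm
      have hrunk : ∀ y ∈ run, pvFirst y = pvFirst x := by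
        intro y hy
        have := List.mem_takeWhile_imp hy
        simpa using this
      have hremsub : ∀ z ∈ rem, z ∈ rest := fun z hz => (List.dropWhile_sublist _).mem hz
      have hremne : ∀ y ∈ rem, y ≠ "" := fun y hy => hne y (List.mem_cons_of_mem _ (hremsub y hy))
      have hrempair : rem.Pairwise (· ≤ ·) :=
        ((List.pairwise_cons.mp hpair).2).sublist (List.dropWhile_sublist _)
      have hremlen : rem.length ≤ n := by
        have h1 : rem.length ≤ rest.length := List.length_dropWhile_le _ _
        have h2 : rest.length ≤ n := by simpa using Nat.le_of_succ_le_succ hlen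
        exact le_trans h1 h2
      obtain ⟨ihp, ihg⟩ := ih rem hremlen hrempair hremne
      -- key-list decomposition: ofList ((x :: rest).map pvFirst) = pvFirst x :: ofList (rem.map pvFirst)
      have hknotr : pvFirst x ∉ rem.map pvFirst := by
        intro hmem
        rcases List.mem_map.mp hmem with ⟨y, hy, hky⟩
        exact hkeyne y hy hky
      have hofl : PySem.Set.ofList ((x :: rest).map pvFirst)
          = pvFirst x :: PySem.Set.ofList (rem.map pvFirst) := by
        have h1 : PySem.Set.ofList ((x :: rest).map pvFirst)
            = (run.map pvFirst ++ rem.map pvFirst).foldl PySem.Set.add [pvFirst x] := by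
          rw [hsplit]
          simp only [List.map_cons, List.map_append, PySem.Set.ofList_eq_foldl, List.foldl_cons,
            List.foldl_append]
          rfl
        have h2 : (run.map pvFirst).foldl PySem.Set.add [pvFirst x] = [pvFirst x] :=
          pvFoldAddMem _ _ (by
            intro a ha
            rcases List.mem_map.mp ha with ⟨y, hy, hky⟩
            simp [← hky, hrunk y hy])
        rw [h1, List.foldl_append, h2, pvFoldAddCons _ _ _ hknotr]
        rfl
      -- every later key is strictly above pvFirst x
      have hlt : ∀ k ∈ PySem.Set.ofList (rem.map pvFirst), pvFirst x < k := by
        intro k hk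
        have hk' : k ∈ rem.map pvFirst := (PySem.Set.mem_ofList _ _).mp hk
        rcases List.mem_map.mp hk' with ⟨y, hy, hky⟩
        have hyne : y ≠ "" := hremne y hy
        have hxy : x ≤ y := hxle y (hremsub y hy)
        have hne' : pvFirst x ≠ pvFirst y := fun h => hkeyne y hy h.symm
        rw [← hky]
        exact pvFirst_lt hxne hyne hxy hne'
      constructor
      · rw [hofl]
        exact List.pairwise_cons.mpr ⟨hlt, ihp⟩
      · -- group equation
        have hfilter_x : (x :: rest).filter (fun y => pvFirst y == pvFirst x) = x :: run := by
          rw [hsplit]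
          simp only [List.filter_cons, List.filter_append, beq_self_eq_true]
          rw [List.filter_eq_self.mpr (by intro y hy; simpa using hrunk y hy),
            List.filter_eq_nil_iff.mpr (by intro y hy; simpa using hkeyne y hy)]
          simp
        have hfilter_k : ∀ k ∈ PySem.Set.ofList (rem.map pvFirst),
            (x :: rest).filter (fun y => pvFirst y == k) = rem.filter (fun y => pvFirst y == k) := by
          intro k hk
          have hxk : pvFirst x ≠ k := ne_of_lt (hlt k hk)
          rw [hsplit]
          simp only [List.filter_cons, List.filter_append]
          rw [if_neg (by simpa using hxk),
            List.filter_eq_nil_iff.mpr (by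
              intro y hy
              have : pvFirst y = pvFirst x := hrunk y hy
              simpa [this] using hxk)]
          simp
        have hgb : pvGroupby (x :: rest) = (pvFirst x, x :: run) :: pvGroupby rem := by
          rw [pvGroupby]
        rw [hgb, hofl, List.map_cons, ihg]
        congr 1
        · rw [hfilter_x]
        · exact (List.map_congr_left (by
            intro k hk
            rw [hfilter_k k hk])).symm

-- ===== VERDICT (by name: the statement is the Claim_ definition above) =====
theorem dictionary_spec : Claim_equal_dictionary := by
  intro l _hdom hpre
  simp only [Spec_dictionary, dictionary, dictionary_alt]
  have hpair : (PySem.List.sorted l (fun x => x) false).Pairwise (· ≤ ·) :=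
    PySem.List.sorted_pairwise l (fun x => x)
  have hne : ∀ y ∈ PySem.List.sorted l (fun x => x) false, y ≠ "" := by
    intro y hy
    have : y ∈ l := (PySem.List.mem_sorted _ _ _ _).1 hy
    intro h; exact hpre (h ▸ this)
  obtain ⟨hkeys, hgrp⟩ := pvMainB (PySem.List.sorted l (fun x => x) false).length _ le_rfl hpair hne
  have hA := pvMain (PySem.List.sorted l (fun x => x) false).length _ le_rfl hpair hne
    PySem.Dict.empty (by intro y _; simp [PySem.Dict.contains, PySem.Dict.empty])
  have hsortedkeys : PySem.List.sorted
      (PySem.Set.ofList ((PySem.List.sorted l (fun x => x) false).map pvFirst)) (fun x => x) false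
      = PySem.Set.ofList ((PySem.List.sorted l (fun x => x) false).map pvFirst) :=
    PySem.List.sorted_eq_of_perm_of_pairwise_lt _ _ _ (List.Perm.refl _) hkeys
  rw [hA, hgrp, hsortedkeys]
  simp [PySem.Dict.empty]
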